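-- pv_equiv track=rewrite | github.com/gli81/HuaweiTest | 009/UniqueNum.py | uniqueNum
-- ===== SOURCE A (Python) =====
-- def uniqueNum(num:'int') -> 'int':
--     num = str(num)
--     ans_list = []
--     for i in range(len(num)):
--         if num[len(num) - i -1] not in ans_list:
--             ans_list.append(num[len(num) - i -1])
--     ans = 0
--     for i in range(len(ans_list)):
--         ans += int(ans_list[i]) * 10 ** (len(ans_list) - i - 1)
--     return ans
-- ===== SOURCE B (Python) =====
-- def uniqueNum(num: 'int') -> 'int':
--     seen = set()
--     ans = 0
--     for d in reversed(str(num)):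
--         if d not in seen:
--             seen.add(d)
--             ans = ans * 10 + int(d)
--     return ans
-- ===== Notes on version B (the rewrite author's own statement) =====
-- stated objective: simpler
-- what changed: A builds a dedup list in one indexed loop and then sums each digit times a power of ten in a second loop; B makes a single pass over the reversed digit string with a seen-set and Horner accumulation (multiply the accumulator by ten, add the digit), with no second pass and no exponentiation.
import Mathlib
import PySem

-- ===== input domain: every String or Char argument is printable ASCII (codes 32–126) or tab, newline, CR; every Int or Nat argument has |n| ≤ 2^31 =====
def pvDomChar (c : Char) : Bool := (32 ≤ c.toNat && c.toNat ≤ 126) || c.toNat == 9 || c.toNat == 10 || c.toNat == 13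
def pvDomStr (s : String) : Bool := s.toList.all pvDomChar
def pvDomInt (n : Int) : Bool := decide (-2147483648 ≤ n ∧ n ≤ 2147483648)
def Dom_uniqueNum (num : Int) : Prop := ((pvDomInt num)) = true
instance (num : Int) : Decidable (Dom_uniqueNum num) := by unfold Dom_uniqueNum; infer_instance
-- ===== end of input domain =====

-- B replaces A's two passes (build dedup list, then sum digit*10^position) by one
-- reversed pass with a seen-set and Horner accumulation ans = ans*10 + d (objective: simpler).

-- ===== PORT A =====
def uniqueNum (num : Int) : Int :=
  let s : List Char := PySem.Int.toChars num           -- num = str(num)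
  let ansList : List Char :=                           -- first loop: dedup from the right
    (PySem.List.pyRange 0 (PySem.List.len s)).foldl
      (fun acc i =>
        let c := PySem.List.pyGetD s (PySem.List.len s - i - 1) ' '
        if acc.contains c then acc else acc ++ [c]) []
  -- second loop: positional power-of-ten sum; int('-') would raise (excluded by Pre_)
  (PySem.List.pyRange 0 (PySem.List.len ansList)).foldl
    (fun ans i =>
      ans + (PySem.Int.ofChars? [PySem.List.pyGetD ansList i ' ']).getD 0
              * 10 ^ ((PySem.List.len ansList - i - 1).toNat)) 0

-- ===== PORT B =====
def uniqueNum_alt (num : Int) : Int :=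
  ((PySem.Int.toChars num).reverse.foldl
    (fun st d =>
      if st.1.contains d then st
      else (PySem.Set.add st.1 d, st.2 * 10 + (PySem.Int.ofChars? [d]).getD 0))
    (PySem.Set.empty, 0)).2

-- ===== PRECONDITION & SPEC =====
-- Pre_ excludes negative num, on which both Pythons raise ValueError (int() of the '-' character).
def Pre_uniqueNum (num : Int) : Prop := 0 ≤ num
instance (num : Int) : Decidable (Pre_uniqueNum num) := by unfold Pre_uniqueNum; infer_instance
def pvWitness_uniqueNum : Int := (9009)

def Spec_uniqueNum (num : Int) (out : Int) : Prop := out = uniqueNum_alt num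
instance (num : Int) (out : Int) : Decidable (Spec_uniqueNum num out) := by unfold Spec_uniqueNum; infer_instance

-- ===== CLAIM (what is proved, stated in full; the proofs are below) =====
def Claim_equal_uniqueNum : Prop := ∀ (num : Int), Dom_uniqueNum num → Pre_uniqueNum num → Spec_uniqueNum num (uniqueNum num)

-- ===== LEMMAS AND PROOFS =====

-- digit value both ports use for int(c)
def pvVal (c : Char) : Int := (PySem.Int.ofChars? [c]).getD 0

-- the new (previously unseen) elements of xs, in order of first appearance
def pvNew (seen : List Char) : List Char → List Char
  | [] => []
  | x :: t => if seen.contains x then pvNew seen t else x :: pvNew (seen ++ [x]) t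

theorem pvNew_ofList (xs : List Char) (seen : List Char) :
    List.foldl PySem.Set.add seen xs = seen ++ pvNew seen xs := by
  induction xs generalizing seen with
  | nil => simp [pvNew]
  | cons x t ih =>
    by_cases hm : x ∈ seen
    · have hbS : PySem.Set.contains seen x = true := by simp [PySem.Set.contains, hm]
      have hbL : List.contains seen x = true := by simpa using hm
      simp only [List.foldl_cons, PySem.Set.add, hbS, if_true, pvNew, hbL]
      exact ih seen
    · have hbS : PySem.Set.contains seen x = true ↔ False := by simp [PySem.Set.contains, hm]
      have hbL : List.contains seen x = true ↔ False := by simpa using hm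
      simp only [List.foldl_cons, PySem.Set.add, hbS, if_false, pvNew, hbL]
      rw [ih]
      simp

theorem pvB_pair (xs : List Char) (seen : PySem.Set Char) (a : Int) :
    xs.foldl
      (fun st d =>
        if st.1.contains d then st
        else (PySem.Set.add st.1 d, st.2 * 10 + (PySem.Int.ofChars? [d]).getD 0))
      (seen, a)
    = (List.foldl PySem.Set.add seen xs,
       (pvNew seen xs).foldl (fun a c => a * 10 + pvVal c) a) := by
  induction xs generalizing seen a with
  | nil => simp [pvNew]
  | cons x t ih =>
    by_cases hm : x ∈ seen
    · have hbS : PySem.Set.contains seen x = true := by simp [PySem.Set.contains, hm]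
      have hbL : List.contains seen x = true := by simpa using hm
      have hadd : PySem.Set.add seen x = seen := by simp [PySem.Set.add, PySem.Set.contains, hm]
      simp only [List.foldl_cons, hbS, if_true, ih, pvNew, hbL, hadd]
    · have hbS : PySem.Set.contains seen x = true ↔ False := by simp [PySem.Set.contains, hm]
      have hbL : List.contains seen x = true ↔ False := by simpa using hm
      have hadd : PySem.Set.add seen x = seen ++ [x] := by
        simp [PySem.Set.add, PySem.Set.contains, hm]
      simp only [List.foldl_cons, hbS, if_false, hadd, ih, pvNew, hbL, pvVal]

theorem pvA_dedup (s : List Char) :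
    (PySem.List.pyRange 0 (PySem.List.len s)).foldl
      (fun acc i =>
        let c := PySem.List.pyGetD s (PySem.List.len s - i - 1) ' '
        if acc.contains c then acc else acc ++ [c]) []
    = PySem.List.dedup s.reverse := by
  have hstep : ∀ (acc : List Char), ∀ i ∈ PySem.List.pyRange 0 (PySem.List.len s),
      (let c := PySem.List.pyGetD s (PySem.List.len s - i - 1) ' '
       if acc.contains c then acc else acc ++ [c])
      = PySem.Set.add acc (PySem.List.pyGetD s.reverse i ' ') := by
    intro acc i hi
    rw [PySem.List.mem_pyRange_one] at hi
    obtain ⟨h0, h1⟩ := hi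
    have hklt : i.toNat < s.length := by
      simp [PySem.List.len] at h1; omega
    have hc : PySem.List.pyGetD s (PySem.List.len s - i - 1) ' '
            = PySem.List.pyGetD s.reverse i ' ' := by
      have hidx : PySem.List.len s - i - 1 = (((s.length - 1 - i.toNat : Nat) : Nat) : Int) := by
        simp only [PySem.List.len]; omega
      have hk : i = ((i.toNat : Nat) : Int) := by omega
      rw [hidx, PySem.List.pyGetD_natCast]
      conv_rhs => rw [hk, PySem.List.pyGetD_natCast]
      have hl1 : s.length - 1 - i.toNat < s.length := by omega
      have hl2 : i.toNat < s.reverse.length := by simpa using hklt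
      rw [List.getD_eq_getElem _ _ hl1, List.getD_eq_getElem _ _ hl2, List.getElem_reverse]
    simp only [hc]
    rfl
  rw [PySem.List.foldl_congr_mem _ _ _ _ hstep]
  have hlen : PySem.List.len s = PySem.List.len s.reverse := by
    simp [PySem.List.len]
  rw [hlen, PySem.List.foldl_pyRange_pyGetD s.reverse ' ' PySem.Set.add [] (le_refl 0)]
  simp [PySem.List.dedup, PySem.Set.ofList, PySem.Set.empty]

theorem pvFoldl_scale (h : Nat → Int) (c : Int) (l : List Nat) (i : Int) :
    l.foldl (fun a k => a + h k * c) (i * c) = (l.foldl (fun a k => a + h k) i) * c := by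
  induction l generalizing i with
  | nil => rfl
  | cons x t ih =>
    simp only [List.foldl_cons]
    rw [← ih (i + h x)]; ring_nf

-- the positional power-of-ten sum over ds is Horner evaluation of ds (Nat-indexed form)
theorem pvSumNat_horner (ds : List Char) :
    (List.range ds.length).foldl
      (fun a k => a + pvVal (ds.getD k ' ') * 10 ^ (ds.length - 1 - k)) 0
    = ds.foldl (fun a c => a * 10 + pvVal c) 0 := by
  induction ds using List.reverseRecOn with
  | nil => simp
  | append_singleton t c ih =>
    rw [List.length_append, List.length_singleton, List.range_succ, List.foldl_append]
    have hstep : ∀ (a : Int), ∀ k ∈ List.range t.length,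
        (fun (a : Int) k => a + pvVal ((t ++ [c]).getD k ' ') * 10 ^ (t.length + 1 - 1 - k)) a k
        = (fun (a : Int) k => a + (pvVal (t.getD k ' ') * 10 ^ (t.length - 1 - k)) * 10) a k := by
      intro a k hk
      rw [List.mem_range] at hk
      simp only []
      rw [List.getD_append _ _ _ _ hk]
      have he : t.length + 1 - 1 - k = (t.length - 1 - k) + 1 := by omega
      rw [he, pow_succ]
      ring
    rw [PySem.List.foldl_congr_mem _ _ _ _ hstep]
    have hscale := pvFoldl_scale (fun k => pvVal (t.getD k ' ') * 10 ^ (t.length - 1 - k))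
      10 (List.range t.length) 0
    rw [show ((0 : Int) * 10) = 0 from by ring] at hscale
    rw [hscale, ih]
    simp only [List.foldl_append, List.foldl_cons, List.foldl_nil]
    rw [List.getD_append_right _ _ _ _ (le_refl t.length)]
    simp

-- bridge: A's Int-indexed second loop equals the Nat-indexed sum
theorem pvSum_horner (ds : List Char) :
    (PySem.List.pyRange 0 (PySem.List.len ds)).foldl
      (fun ans i =>
        ans + (PySem.Int.ofChars? [PySem.List.pyGetD ds i ' ']).getD 0
                * 10 ^ ((PySem.List.len ds - i - 1).toNat)) 0
    = ds.foldl (fun a c => a * 10 + pvVal c) 0 := by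
  have hlen : PySem.List.len ds = ((ds.length : Nat) : Int) := by simp [PySem.List.len]
  rw [hlen, PySem.List.pyRange_zero_natCast, List.foldl_map]
  have hstep : ∀ (a : Int), ∀ k ∈ List.range ds.length,
      (fun (ans : Int) (k : Nat) =>
        ans + (PySem.Int.ofChars? [PySem.List.pyGetD ds ((k : Nat) : Int) ' ']).getD 0
                * 10 ^ ((((ds.length : Nat) : Int) - (k : Nat) - 1).toNat)) a k
      = (fun (ans : Int) (k : Nat) =>
        ans + pvVal (ds.getD k ' ') * 10 ^ (ds.length - 1 - k)) a k := by
    intro a k hk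
    rw [List.mem_range] at hk
    simp only [PySem.List.pyGetD_natCast, pvVal]
    have he : (((ds.length : Nat) : Int) - (k : Nat) - 1).toNat = ds.length - 1 - k := by
      omega
    rw [he]
  rw [PySem.List.foldl_congr_mem _ _ _ _ hstep]
  exact pvSumNat_horner ds

-- ===== VERDICT (by name: the statement is the Claim_ definition above) =====
theorem uniqueNum_spec : Claim_equal_uniqueNum := by
  intro num _ _
  show uniqueNum num = uniqueNum_alt num
  simp only [uniqueNum, uniqueNum_alt]
  rw [pvA_dedup, pvSum_horner, pvB_pair]
  simp only [PySem.List.dedup, PySem.Set.ofList, PySem.Set.empty]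
  rw [pvNew_ofList]
  simp [pvVal]
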